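-- pv_equiv track=rewrite | github.com/981377660LMT/algorithm-study | 12_贪心算法/数组排序/mergeTwoArrayWithMinCost.py | mergeTwoArrayWithMinCost
-- ===== SOURCE A (Python) =====
-- from typing import List, Tuple
--
-- def mergeTwoArrayWithMinCost(arr1: List[int], arr2: List[int]) -> Tuple[int, List[Tuple[int, int]]]:
--     """
--     合并两个数组，最小化总代价.
--     第i个数的代价为:`(这个数之前"不同"类型的数的个数+1)*这个数`.
--     返回最小代价和合并的结果，结果每一项形如(type, index).
--     """
--     order1 = sorted(list(range(len(arr1))), key=lambda i: -arr1[i])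
--     order2 = sorted(list(range(len(arr2))), key=lambda i: -arr2[i])
--     resCost, resArray = 0, []
--     count1, count2 = 1, 1
--     i, j = 0, 0
--     while i < len(arr1) and j < len(arr2):
--         ptr1, ptr2 = order1[i], order2[j]
--         if arr1[ptr1] > arr2[ptr2]:
--             resCost += arr1[ptr1] * count2
--             resArray.append((1, ptr1))
--             i += 1
--             count1 += 1
--         else:
--             resCost += arr2[ptr2] * count1
--             resArray.append((2, ptr2))
--             j += 1
--             count2 += 1
--     while i < len(arr1):
--         ptr1 = order1[i]
--         resCost += arr1[ptr1] * count2
--         resArray.append((1, ptr1))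
--         i += 1
--     while j < len(arr2):
--         ptr2 = order2[j]
--         resCost += arr2[ptr2] * count1
--         resArray.append((2, ptr2))
--         j += 1
--     return resCost, resArray
-- ===== SOURCE B (Python) =====
-- from typing import List, Tuple
--
-- def mergeTwoArrayWithMinCost(arr1: List[int], arr2: List[int]) -> Tuple[int, List[Tuple[int, int]]]:
--     """Single combined sort instead of two index sorts plus a three-loop merge."""
--     items = [(v, 1, i) for i, v in enumerate(arr1)] + [(v, 2, j) for j, v in enumerate(arr2)]
--     # key encodes (-value, type-rank) in one int: arr2 (rank 0) before arr1 (rank 1) on ties;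
--     # stability keeps ascending original index within each array.
--     items.sort(key=lambda e: -2 * e[0] + (1 if e[1] == 1 else 0))
--     resCost, resArray = 0, []
--     count1, count2 = 1, 1
--     for v, t, i in items:
--         if t == 1:
--             resCost += v * count2
--             count1 += 1
--         else:
--             resCost += v * count1
--             count2 += 1
--         resArray.append((t, i))
--     return resCost, resArray
-- ===== Notes on version B (the rewrite author's own statement) =====
-- stated objective: simpler
-- what changed: Replaces A's two separate index sorts plus a three-while-loop merge by building one combined (value, type, index) triple list, sorting it once with a key that encodes (-value, type-rank) so arr2 wins ties, and a single counting pass over it.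
import Mathlib
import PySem

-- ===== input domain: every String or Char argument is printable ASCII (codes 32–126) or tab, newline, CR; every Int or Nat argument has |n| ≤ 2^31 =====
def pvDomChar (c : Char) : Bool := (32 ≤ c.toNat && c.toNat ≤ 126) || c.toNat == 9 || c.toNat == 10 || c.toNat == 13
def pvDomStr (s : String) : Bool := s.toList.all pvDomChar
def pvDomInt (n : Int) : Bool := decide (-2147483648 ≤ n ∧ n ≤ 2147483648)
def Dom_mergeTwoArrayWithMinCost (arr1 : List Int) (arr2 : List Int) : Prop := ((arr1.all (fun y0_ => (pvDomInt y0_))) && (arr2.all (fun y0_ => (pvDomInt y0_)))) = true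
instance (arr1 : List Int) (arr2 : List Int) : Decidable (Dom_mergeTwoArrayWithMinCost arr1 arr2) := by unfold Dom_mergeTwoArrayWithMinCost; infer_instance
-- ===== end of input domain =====

-- B replaces A's two index sorts + three merge loops by ONE sort of the combined
-- (value, type, index) triples followed by a single counting pass (objective: simpler).

-- ===== PORT A =====
-- second while loop of A ('while i < len(arr1)': only count2 is still read)
def pvA_tail1 (arr1 : List Int) : List Int → Int → List (Int × Int) → Int → Int × List (Int × Int)
  | [], cost, res, _c2 => (cost, res)
  | p1 :: rest, cost, res, c2 =>
      pvA_tail1 arr1 rest (cost + PySem.List.pyGetD arr1 p1 0 * c2) (res ++ [(1, p1)]) c2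

-- third while loop of A ('while j < len(arr2)')
def pvA_tail2 (arr2 : List Int) : List Int → Int → List (Int × Int) → Int → Int × List (Int × Int)
  | [], cost, res, _c1 => (cost, res)
  | p2 :: rest, cost, res, c1 =>
      pvA_tail2 arr2 rest (cost + PySem.List.pyGetD arr2 p2 0 * c1) (res ++ [(2, p2)]) c1

-- first while loop of A; i, j are represented by the unconsumed suffixes of order1/order2
def pvA_merge (arr1 arr2 : List Int) :
    List Int → List Int → Int → List (Int × Int) → Int → Int → Int × List (Int × Int)
  | p1 :: t1, p2 :: t2, cost, res, c1, c2 =>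
      if PySem.List.pyGetD arr1 p1 0 > PySem.List.pyGetD arr2 p2 0 then
        pvA_merge arr1 arr2 t1 (p2 :: t2) (cost + PySem.List.pyGetD arr1 p1 0 * c2)
          (res ++ [(1, p1)]) (c1 + 1) c2
      else
        pvA_merge arr1 arr2 (p1 :: t1) t2 (cost + PySem.List.pyGetD arr2 p2 0 * c1)
          (res ++ [(2, p2)]) c1 (c2 + 1)
  | l1, [], cost, res, _c1, c2 => pvA_tail1 arr1 l1 cost res c2
  | [], l2, cost, res, c1, _c2 => pvA_tail2 arr2 l2 cost res c1
  termination_by l1 l2 => l1.length + l2.length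
  decreasing_by all_goals (simp_all; try omega)

def mergeTwoArrayWithMinCost (arr1 : List Int) (arr2 : List Int) : Int × (List (Int × Int)) :=
  let order1 := PySem.List.sorted (PySem.List.pyRange 0 (PySem.List.len arr1))
      (fun i => -(PySem.List.pyGetD arr1 i 0))
  let order2 := PySem.List.sorted (PySem.List.pyRange 0 (PySem.List.len arr2))
      (fun i => -(PySem.List.pyGetD arr2 i 0))
  pvA_merge arr1 arr2 order1 order2 0 [] 1 1

-- ===== PORT B =====
-- Source B's sort key: encodes (-value, type-rank) in one integer, arr2 (rank 0) before arr1 (rank 1)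
def pvB_key (e : Int × Int × Int) : Int := -2 * e.1 + (if e.2.1 == 1 then 1 else 0)

-- Source B's single counting pass over the sorted triples
def pvB_loop : List (Int × Int × Int) → Int → List (Int × Int) → Int → Int → Int × List (Int × Int)
  | [], cost, res, _c1, _c2 => (cost, res)
  | (v, t, i) :: rest, cost, res, c1, c2 =>
      let res' := res ++ [(t, i)]
      if t == 1 then pvB_loop rest (cost + v * c2) res' (c1 + 1) c2
      else pvB_loop rest (cost + v * c1) res' c1 (c2 + 1)

def mergeTwoArrayWithMinCost_alt (arr1 : List Int) (arr2 : List Int) : Int × (List (Int × Int)) :=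
  let items := (PySem.List.enumerate arr1).map (fun p => (p.2, (1 : Int), p.1)) ++
               (PySem.List.enumerate arr2).map (fun p => (p.2, (2 : Int), p.1))
  let s := PySem.List.sorted items pvB_key
  pvB_loop s 0 [] 1 1

-- ===== PRECONDITION & SPEC =====
def Spec_mergeTwoArrayWithMinCost (arr1 : List Int) (arr2 : List Int) (out : Int × (List (Int × Int))) : Prop := out = mergeTwoArrayWithMinCost_alt arr1 arr2
instance (arr1 : List Int) (arr2 : List Int) (out : Int × (List (Int × Int))) : Decidable (Spec_mergeTwoArrayWithMinCost arr1 arr2 out) := by unfold Spec_mergeTwoArrayWithMinCost; infer_instance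

-- ===== CLAIM (what is proved, stated in full; the proofs are below) =====
def Claim_equal_mergeTwoArrayWithMinCost : Prop := ∀ (arr1 : List Int) (arr2 : List Int), Dom_mergeTwoArrayWithMinCost arr1 arr2 → Spec_mergeTwoArrayWithMinCost arr1 arr2 (mergeTwoArrayWithMinCost arr1 arr2)

-- ===== LEMMAS AND PROOFS =====

-- the strict order in which the merged triples come out: by Source B's key, ties broken by original index
def pvR (a b : Int × Int × Int) : Prop :=
  pvB_key a < pvB_key b ∨ (pvB_key a = pvB_key b ∧ a.2.2 < b.2.2)

-- the triple a merge-loop element of A corresponds to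
def pvF (arr : List Int) (t : Int) (i : Int) : Int × Int × Int := (PySem.List.pyGetD arr i 0, t, i)

-- reference merge of two triple streams (A's comparison)
def pvMergeT : List (Int × Int × Int) → List (Int × Int × Int) → List (Int × Int × Int)
  | x :: xs, y :: ys =>
      if x.1 > y.1 then x :: pvMergeT xs (y :: ys) else y :: pvMergeT (x :: xs) ys
  | l1, [] => l1
  | [], l2 => l2
  termination_by l1 l2 => l1.length + l2.length
  decreasing_by all_goals (simp_all; try omega)

theorem pvMergeT_perm (l1 l2 : List (Int × Int × Int)) : (pvMergeT l1 l2).Perm (l1 ++ l2) := by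
  induction l1, l2 using pvMergeT.induct with
  | case1 x xs y ys h ih => rw [pvMergeT]; simp [h]; exact ih
  | case2 x xs y ys h ih =>
      rw [pvMergeT]; simp [h]
      exact (ih.cons y).trans (List.perm_middle).symm
  | case3 l1 => rw [pvMergeT]; simp
  | case4 l2 h =>
      cases l2 with
      | nil => exact absurd rfl h
      | cons a t => rw [pvMergeT] <;> simp

-- STABILITY of PySem's sort: if equal-k1 elements come in strictly increasing k2,
-- the output is strictly sorted by (k1, k2) lexicographically.
theorem pv_insertBy_pairwise {α : Type} (k1 k2 : α → Int) (x : α) (acc : List α)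
    (hp : acc.Pairwise (fun a b => k1 a < k1 b ∨ (k1 a = k1 b ∧ k2 a < k2 b)))
    (hx : ∀ a ∈ acc, k1 a = k1 x → k2 a < k2 x) :
    (PySem.List.insertBy (fun a b => decide (k1 a < k1 b)) x acc).Pairwise
      (fun a b => k1 a < k1 b ∨ (k1 a = k1 b ∧ k2 a < k2 b)) := by
  induction acc with
  | nil => simp [PySem.List.insertBy]
  | cons y ys ih =>
      simp only [PySem.List.insertBy]
      by_cases h : k1 x < k1 y
      · simp only [h, decide_true, if_true]
        refine List.Pairwise.cons ?_ hp
        intro z hz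
        rcases List.mem_cons.mp hz with rfl | hz
        · exact Or.inl h
        · have := List.rel_of_pairwise_cons hp hz
          rcases this with h' | ⟨h', _⟩
          · exact Or.inl (lt_trans h h')
          · exact Or.inl (h' ▸ h)
      · simp only [h, decide_false, Bool.false_eq_true, if_false]
        refine List.Pairwise.cons ?_ (ih hp.tail (fun a ha => hx a (List.mem_cons_of_mem y ha)))
        intro z hz
        rw [PySem.List.mem_insertBy] at hz
        rcases hz with rfl | hz
        · rcases lt_or_eq_of_le (not_lt.mp h) with h' | h'
          · exact Or.inl h'
          · exact Or.inr ⟨h', hx y List.mem_cons_self h'⟩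
        · exact List.rel_of_pairwise_cons hp hz

theorem pv_sorted_pairwise_stable {α : Type} (k1 k2 : α → Int) (xs : List α)
    (h : xs.Pairwise (fun a b => k1 a = k1 b → k2 a < k2 b)) :
    (PySem.List.sorted xs k1).Pairwise
      (fun a b => k1 a < k1 b ∨ (k1 a = k1 b ∧ k2 a < k2 b)) := by
  rw [PySem.List.sorted_eq_foldl_insertBy]
  suffices H : ∀ (acc : List α),
      acc.Pairwise (fun a b => k1 a < k1 b ∨ (k1 a = k1 b ∧ k2 a < k2 b)) →
      (∀ a ∈ acc, ∀ b ∈ xs, k1 a = k1 b → k2 a < k2 b) →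
      (xs.foldl (fun acc x => PySem.List.insertBy (fun a b => decide (k1 a < k1 b)) x acc) acc).Pairwise
        (fun a b => k1 a < k1 b ∨ (k1 a = k1 b ∧ k2 a < k2 b)) by
    exact H [] (by simp) (by simp)
  induction xs with
  | nil => intro acc hacc _; simpa using hacc
  | cons x t ih =>
      intro acc hacc hcross
      simp only [List.foldl_cons]
      refine ih h.tail (PySem.List.insertBy _ x acc) ?_ ?_
      · exact pv_insertBy_pairwise k1 k2 x acc hacc
          (fun a ha heq => hcross a ha x List.mem_cons_self heq)
      · intro a ha b hb heq
        rw [PySem.List.mem_insertBy] at ha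
        rcases ha with rfl | ha
        · exact List.rel_of_pairwise_cons h hb heq
        · exact hcross a ha b (List.mem_cons_of_mem x hb) heq

theorem pv_enumerate_len {α : Type} (xs : List α) (s : Int) :
    (PySem.List.enumerate xs s).length = xs.length := by
  induction xs generalizing s with
  | nil => rfl
  | cons x t ih => simp [PySem.List.enumerate, ih]

theorem pv_enumerate_getElem {α : Type} (xs : List α) (s : Int) (k : Nat) (hk : k < xs.length)
    (hk' : k < (PySem.List.enumerate xs s).length) :
    (PySem.List.enumerate xs s)[k] = (s + k, xs[k]) := by
  induction xs generalizing s k with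
  | nil => simp at hk
  | cons x t ih =>
      cases k with
      | zero => simp [PySem.List.enumerate]
      | succ m =>
          have h : (PySem.List.enumerate (x :: t) s) = (s, x) :: PySem.List.enumerate t (s + 1) := by
            simp [PySem.List.enumerate]
          have hm : m < t.length := by simpa using hk
          have hm' : m < (PySem.List.enumerate t (s + 1)).length := by
            rw [pv_enumerate_len]; exact hm
          simp only [h, List.getElem_cons_succ]
          rw [ih (s + 1) m hm hm']
          have : s + 1 + (m : Int) = s + ((m : Nat) + 1 : Nat) := by push_cast; ring
          rw [this]

theorem pv_mem_enumerate_fst {α : Type} (xs : List α) (s : Int) (q : Int × α)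
    (hq : q ∈ PySem.List.enumerate xs s) : s ≤ q.1 := by
  induction xs generalizing s with
  | nil => simp [PySem.List.enumerate] at hq
  | cons x t ih =>
      simp [PySem.List.enumerate] at hq
      rcases hq with h | h
      · simp [h]
      · have := ih (s + 1) h; omega

theorem pv_enumerate_fst_lt {α : Type} (xs : List α) (s : Int) :
    (PySem.List.enumerate xs s).Pairwise (fun p q => p.1 < q.1) := by
  induction xs generalizing s with
  | nil => simp [PySem.List.enumerate]
  | cons x t ih =>
      simp only [PySem.List.enumerate]
      refine List.Pairwise.cons ?_ (ih (s + 1))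
      intro q hq
      have := pv_mem_enumerate_fst t (s + 1) q hq
      simp; omega

-- A's sorted index list, mapped to triples, is exactly B's enumerate triples as a multiset
theorem pv_range_map_eq_enumerate (xs : List Int) (t : Int) :
    (PySem.List.pyRange 0 (PySem.List.len xs)).map (pvF xs t) =
      (PySem.List.enumerate xs).map (fun p => (p.2, t, p.1)) := by
  have hlen : PySem.List.len xs = (xs.length : Int) := by simp [PySem.List.len]
  rw [hlen, PySem.List.pyRange_zero_natCast]
  apply List.ext_getElem
  · simp
  · intro k h1 h2
    simp only [List.getElem_map, List.getElem_range]
    have hk : k < xs.length := by simpa using h1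
    rw [pv_enumerate_getElem xs 0 k hk (by rw [pv_enumerate_len]; exact hk)]
    simp [pvF, PySem.List.pyGetD_natCast, List.getElem?_eq_getElem hk]

theorem pv_key_type1 (e : Int × Int × Int) (h : e.2.1 = 1) : pvB_key e = -2 * e.1 + 1 := by
  simp [pvB_key, h]
theorem pv_key_type2 (e : Int × Int × Int) (h : e.2.1 = 2) : pvB_key e = -2 * e.1 := by
  simp [pvB_key, h]

-- merged triples are strictly pvR-sorted
theorem pvMergeT_pairwise (l1 l2 : List (Int × Int × Int))
    (h1 : l1.Pairwise pvR) (h2 : l2.Pairwise pvR)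
    (ht1 : ∀ e ∈ l1, e.2.1 = 1) (ht2 : ∀ e ∈ l2, e.2.1 = 2) :
    (pvMergeT l1 l2).Pairwise pvR := by
  induction l1, l2 using pvMergeT.induct with
  | case1 x xs y ys h ih =>
      rw [pvMergeT]; simp only [h, if_true]
      refine List.Pairwise.cons ?_ (ih h1.tail h2
        (fun e he => ht1 e (List.mem_cons_of_mem x he)) ht2)
      intro z hz
      have hz' : z ∈ xs ++ (y :: ys) := (pvMergeT_perm xs (y :: ys)).mem_iff.mp hz
      rcases List.mem_append.mp hz' with hz1 | hz2
      · exact List.rel_of_pairwise_cons h1 hz1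
      · have hzt : z.2.1 = 2 := ht2 z hz2
        have hxt : x.2.1 = 1 := ht1 x List.mem_cons_self
        have hzy : z.1 ≤ y.1 := by
          rcases List.mem_cons.mp hz2 with rfl | hz2
          · exact le_refl _
          · have := List.rel_of_pairwise_cons h2 hz2
            have hyt : y.2.1 = 2 := ht2 y List.mem_cons_self
            rcases this with h' | ⟨h', _⟩ <;>
              rw [pv_key_type2 y hyt, pv_key_type2 z hzt] at h' <;> omega
        left
        rw [pv_key_type1 x hxt, pv_key_type2 z hzt]
        omega
  | case2 x xs y ys h ih =>
      rw [pvMergeT]; simp only [h, if_false]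
      refine List.Pairwise.cons ?_ (ih h1 h2.tail ht1
        (fun e he => ht2 e (List.mem_cons_of_mem y he)))
      intro z hz
      have hz' : z ∈ (x :: xs) ++ ys := (pvMergeT_perm (x :: xs) ys).mem_iff.mp hz
      rcases List.mem_append.mp hz' with hz1 | hz2
      · have hzt : z.2.1 = 1 := ht1 z hz1
        have hyt : y.2.1 = 2 := ht2 y List.mem_cons_self
        have hzx : z.1 ≤ x.1 := by
          rcases List.mem_cons.mp hz1 with rfl | hz1
          · exact le_refl _
          · have := List.rel_of_pairwise_cons h1 hz1
            have hxt : x.2.1 = 1 := ht1 x List.mem_cons_self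
            rcases this with h' | ⟨h', _⟩ <;>
              rw [pv_key_type1 x hxt, pv_key_type1 z hzt] at h' <;> omega
        have hxy : x.1 ≤ y.1 := not_lt.mp h
        left
        rw [pv_key_type2 y hyt, pv_key_type1 z hzt]
        omega
      · exact List.rel_of_pairwise_cons h2 hz2
  | case3 l1 =>
      rw [pvMergeT]; exact h1
  | case4 l2 hne =>
      cases l2 with
      | nil => exact absurd rfl hne
      | cons a t => rw [pvMergeT] <;> simp_all

-- FUSION: A's merge loop is B's counting pass over the merged triples
theorem pv_fuse_tail1 (arr1 : List Int) (l : List Int) (cost : Int) (res : List (Int × Int))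
    (c1 c2 : Int) :
    pvB_loop (l.map (pvF arr1 1)) cost res c1 c2 = pvA_tail1 arr1 l cost res c2 := by
  induction l generalizing cost res c1 with
  | nil => rfl
  | cons p rest ih => simp only [List.map_cons, pvB_loop, pvF, pvA_tail1]; simp; exact ih _ _ _

theorem pv_fuse_tail2 (arr2 : List Int) (l : List Int) (cost : Int) (res : List (Int × Int))
    (c1 c2 : Int) :
    pvB_loop (l.map (pvF arr2 2)) cost res c1 c2 = pvA_tail2 arr2 l cost res c1 := by
  induction l generalizing cost res c2 with
  | nil => rfl
  | cons p rest ih => simp only [List.map_cons, pvB_loop, pvF, pvA_tail2]; simp; exact ih _ _ _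

theorem pv_fuse (arr1 arr2 : List Int) (l1 l2 : List Int) (cost : Int) (res : List (Int × Int))
    (c1 c2 : Int) :
    pvA_merge arr1 arr2 l1 l2 cost res c1 c2 =
      pvB_loop (pvMergeT (l1.map (pvF arr1 1)) (l2.map (pvF arr2 2))) cost res c1 c2 := by
  induction l1, l2, cost, res, c1, c2 using pvA_merge.induct arr1 arr2 with
  | case1 p1 t1 p2 t2 cost res c1 c2 h ih =>
      rw [pvA_merge]; simp only [h, if_true]
      rw [ih]
      simp only [List.map_cons]
      rw [pvMergeT]
      simp only [pvF, h, if_true]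
      simp [pvB_loop]
  | case2 p1 t1 p2 t2 cost res c1 c2 h ih =>
      rw [pvA_merge]; simp only [h, if_false]
      rw [ih]
      simp only [List.map_cons]
      rw [pvMergeT]
      simp only [pvF, h, if_false]
      simp [pvB_loop]
  | case3 l1 cost res c1 c2 =>
      rw [pvA_merge]
      rw [List.map_nil, pvMergeT]
      exact (pv_fuse_tail1 arr1 l1 cost res c1 c2).symm
  | case4 l2 cost res c1 c2 hne =>
      cases l2 with
      | nil => exact absurd rfl hne
      | cons a t =>
          rw [pvA_merge]
          · rw [List.map_nil, List.map_cons, pvMergeT]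
            · exact (pv_fuse_tail2 arr2 (a :: t) cost res c1 c2).symm
            · simp
          · exact hne

-- B's sorted list IS the merged triple list (uniqueness of the strictly sorted permutation)
theorem pv_sorted_eq_merge (arr1 arr2 : List Int) :
    PySem.List.sorted
        ((PySem.List.enumerate arr1).map (fun p => (p.2, (1 : Int), p.1)) ++
          (PySem.List.enumerate arr2).map (fun p => (p.2, (2 : Int), p.1))) pvB_key =
      pvMergeT
        ((PySem.List.sorted (PySem.List.pyRange 0 (PySem.List.len arr1))
            (fun i => -(PySem.List.pyGetD arr1 i 0))).map (pvF arr1 1))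
        ((PySem.List.sorted (PySem.List.pyRange 0 (PySem.List.len arr2))
            (fun i => -(PySem.List.pyGetD arr2 i 0))).map (pvF arr2 2)) := by
  set items1 := (PySem.List.enumerate arr1).map (fun p : Int × Int => (p.2, (1 : Int), p.1)) with hi1
  set items2 := (PySem.List.enumerate arr2).map (fun p : Int × Int => (p.2, (2 : Int), p.1)) with hi2
  set o1 := PySem.List.sorted (PySem.List.pyRange 0 (PySem.List.len arr1))
      (fun i => -(PySem.List.pyGetD arr1 i 0)) with ho1
  set o2 := PySem.List.sorted (PySem.List.pyRange 0 (PySem.List.len arr2))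
      (fun i => -(PySem.List.pyGetD arr2 i 0)) with ho2
  have ht1 : ∀ e ∈ o1.map (pvF arr1 1), e.2.1 = 1 := by
    intro e he; rcases List.mem_map.mp he with ⟨i, _, rfl⟩; rfl
  have ht2 : ∀ e ∈ o2.map (pvF arr2 2), e.2.1 = 2 := by
    intro e he; rcases List.mem_map.mp he with ⟨i, _, rfl⟩; rfl
  -- each mapped order list is strictly pvR-sorted (stability with tiebreak = the index itself)
  have hrange : ∀ (xs : List Int), (PySem.List.pyRange 0 (PySem.List.len xs)).Pairwise
      (fun a b : Int => (fun i => -(PySem.List.pyGetD xs i 0)) a = (fun i => -(PySem.List.pyGetD xs i 0)) b → a < b) := by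
    intro xs
    have hlen : PySem.List.len xs = (xs.length : Int) := by simp [PySem.List.len]
    rw [hlen, PySem.List.pyRange_zero_natCast]
    rw [List.pairwise_map]
    exact List.pairwise_lt_range.imp (by intro a b h _; exact_mod_cast h)
  have hp1 : (o1.map (pvF arr1 1)).Pairwise pvR := by
    rw [List.pairwise_map]
    refine (pv_sorted_pairwise_stable (fun i => -(PySem.List.pyGetD arr1 i 0)) (fun i => i)
      _ (hrange arr1)).imp ?_
    intro a b hab
    simp only [pvR, pvF, pv_key_type1 (PySem.List.pyGetD arr1 a 0, 1, a) rfl,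
      pv_key_type1 (PySem.List.pyGetD arr1 b 0, 1, b) rfl] at *
    rcases hab with h | ⟨h, h'⟩
    · left; omega
    · right; constructor <;> omega
  have hp2 : (o2.map (pvF arr2 2)).Pairwise pvR := by
    rw [List.pairwise_map]
    refine (pv_sorted_pairwise_stable (fun i => -(PySem.List.pyGetD arr2 i 0)) (fun i => i)
      _ (hrange arr2)).imp ?_
    intro a b hab
    simp only [pvR, pvF, pv_key_type2 (PySem.List.pyGetD arr2 a 0, 2, a) rfl,
      pv_key_type2 (PySem.List.pyGetD arr2 b 0, 2, b) rfl] at *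
    rcases hab with h | ⟨h, h'⟩
    · left; omega
    · right; constructor <;> omega
  -- the merge is a permutation of items1 ++ items2
  have hperm : (pvMergeT (o1.map (pvF arr1 1)) (o2.map (pvF arr2 2))).Perm (items1 ++ items2) := by
    refine (pvMergeT_perm _ _).trans (List.Perm.append ?_ ?_)
    · rw [hi1, ← pv_range_map_eq_enumerate arr1 1]
      exact (PySem.List.sorted_perm _ _ _).map _
    · rw [hi2, ← pv_range_map_eq_enumerate arr2 2]
      exact (PySem.List.sorted_perm _ _ _).map _
  -- B's sorted list is strictly pvR-sorted too
  have hsp : (PySem.List.sorted (items1 ++ items2) pvB_key).Pairwise pvR := by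
    refine pv_sorted_pairwise_stable pvB_key (fun e => e.2.2) _ ?_
    rw [List.pairwise_append]
    refine ⟨?_, ?_, ?_⟩
    · rw [hi1, List.pairwise_map]
      refine (pv_enumerate_fst_lt arr1 0).imp ?_
      intro p q h _; exact h
    · rw [hi2, List.pairwise_map]
      refine (pv_enumerate_fst_lt arr2 0).imp ?_
      intro p q h _; exact h
    · intro a ha b hb heq
      rcases List.mem_map.mp ha with ⟨p, _, rfl⟩
      rcases List.mem_map.mp hb with ⟨q, _, rfl⟩
      exfalso
      rw [pv_key_type1 _ rfl, pv_key_type2 _ rfl] at heq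
      omega
  -- uniqueness of the strictly sorted permutation
  refine List.Perm.eq_of_pairwise ?_ hsp
    (pvMergeT_pairwise _ _ hp1 hp2 ht1 ht2)
    ((PySem.List.sorted_perm _ _ _).trans hperm.symm)
  intro a b _ _ hab hba
  exfalso
  rcases hab with h | ⟨h, h'⟩ <;> rcases hba with g | ⟨g, g'⟩ <;> omega

-- ===== VERDICT (by name: the statement is the Claim_ definition above) =====
theorem mergeTwoArrayWithMinCost_spec : Claim_equal_mergeTwoArrayWithMinCost := by
  intro arr1 arr2 _
  unfold Spec_mergeTwoArrayWithMinCost mergeTwoArrayWithMinCost mergeTwoArrayWithMinCost_alt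
  rw [pv_fuse, ← pv_sorted_eq_merge]
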